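-- pv_equiv track=rewrite | github.com/MachangDoniel/Sessional-CSE-3200-System-Development-Project | PDF to EXCEL/Project/main.py | convert_year_term_suffixes_to_bengali
-- ===== SOURCE A (Python) =====
-- def convert_year_term_suffixes_to_bengali(text):
--     # Dictionary mapping English year_term_suffixes to Bengali
--     year_term_suffixes_mapping = {
--         "1st": "১ম",
--         "2nd": "২য়",
--         "3rd": "৩য়",
--         "4th": "৪র্থ",  # You can add more mappings as needed
--         # Add more mappings for other year_term_suffixes
--     }
--
--     # Replace English year_term_suffixes with Bengali equivalents
--     for suffix in year_term_suffixes_mapping: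
--         if suffix in text:
--             text = text.replace(suffix, year_term_suffixes_mapping[suffix])
--
--     return text
-- ===== SOURCE B (Python) =====
-- def convert_year_term_suffixes_to_bengali(text):
--     # Single left-to-right pass: at each position try the 3-char chunk in the
--     # mapping; emit the Bengali replacement (skip 3) or the single character.
--     mapping = {
--         "1st": "১ম",
--         "2nd": "২য়",
--         "3rd": "৩য়",
--         "4th": "৪র্থ",
--     }
--     out = []
--     i = 0
--     n = len(text)
--     while i < n:
--         chunk = text[i:i + 3]
--         if chunk in mapping:
--             out.append(mapping[chunk])
--             i += 3
--         else:
--             out.append(text[i])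
--             i += 1
--     return "".join(out)
-- ===== Notes on version B (the rewrite author's own statement) =====
-- stated objective: alternative
-- what changed: B replaces the four sequential whole-string .replace passes (one per mapping key) by a single left-to-right scan that looks up each 3-character chunk in the dict once, emitting either the Bengali replacement or the character.
import Mathlib
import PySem

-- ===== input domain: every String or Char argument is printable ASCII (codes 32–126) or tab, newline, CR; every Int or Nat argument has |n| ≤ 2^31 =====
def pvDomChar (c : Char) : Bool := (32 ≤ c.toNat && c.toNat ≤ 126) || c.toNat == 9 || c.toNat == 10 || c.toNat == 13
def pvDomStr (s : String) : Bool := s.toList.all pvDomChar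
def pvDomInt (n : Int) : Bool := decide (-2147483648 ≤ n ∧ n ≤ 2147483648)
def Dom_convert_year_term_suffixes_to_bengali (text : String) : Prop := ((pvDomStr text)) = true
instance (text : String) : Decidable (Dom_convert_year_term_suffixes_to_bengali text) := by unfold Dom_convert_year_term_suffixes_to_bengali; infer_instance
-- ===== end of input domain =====

-- B replaces A's four sequential whole-string .replace passes by one left-to-right
-- scan that looks up each 3-character chunk in the mapping once (objective: alternative).

-- ===== PORT A =====
-- the dict literal of A, in insertion order
def amap_cytb : PySem.Dict String String :=
  PySem.Dict.ofList [("1st", "\u09E7\u09AE"), ("2nd", "\u09E8\u09DF"), ("3rd", "\u09E9\u09DF"), ("4th", "\u09EA\u09B0\u09CD\u09A5")]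

-- for suffix in mapping: if suffix in text: text = text.replace(suffix, mapping[suffix])
def convert_year_term_suffixes_to_bengali (text : String) : String :=
  (PySem.Dict.keys amap_cytb).foldl
    (fun t suffix =>
      if PySem.Str.isIn suffix t then
        PySem.Str.replace t suffix (PySem.Dict.getD amap_cytb suffix "")
      else t)
    text

-- ===== PORT B =====
-- the same dict, with keys/values as char lists (B works chunk-wise over the characters)
def bmap_cytb : PySem.Dict (List Char) (List Char) :=
  PySem.Dict.ofList
    [(['1','s','t'], ['\u09E7','\u09AE']), (['2','n','d'], ['\u09E8','\u09DF']),
     (['3','r','d'], ['\u09E9','\u09DF']), (['4','t','h'], ['\u09EA','\u09B0','\u09CD','\u09A5'])]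

-- the while loop of B: chunk = text[i:i+3]; if chunk in mapping: emit mapping[chunk], i += 3; else emit text[i], i += 1
def goB_cytb : List Char → List Char
  | [] => []
  | c :: t =>
    match PySem.Dict.get? bmap_cytb ((c :: t).take 3) with
    | some r => r ++ goB_cytb (t.drop 2)
    | none => c :: goB_cytb t
termination_by l => l.length
decreasing_by
  · simp only [List.length_drop, List.length_cons]; omega
  · simp

def convert_year_term_suffixes_to_bengali_alt (text : String) : String :=
  String.ofList (goB_cytb text.toList)

-- ===== PRECONDITION & SPEC =====
def Spec_convert_year_term_suffixes_to_bengali (text : String) (out : String) : Prop := out = convert_year_term_suffixes_to_bengali_alt text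
instance (text : String) (out : String) : Decidable (Spec_convert_year_term_suffixes_to_bengali text out) := by unfold Spec_convert_year_term_suffixes_to_bengali; infer_instance

-- ===== CLAIM (what is proved, stated in full; the proofs are below) =====
def Claim_equal_convert_year_term_suffixes_to_bengali : Prop := ∀ (text : String), Dom_convert_year_term_suffixes_to_bengali text → Spec_convert_year_term_suffixes_to_bengali text (convert_year_term_suffixes_to_bengali text)

-- ===== LEMMAS AND PROOFS =====

-- a simple structural version of Python's str.replace (left-to-right, non-overlapping)
def rep_cytb (old new : List Char) : List Char → List Char
  | [] => []
  | c :: t =>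
    if _h : old.isPrefixOf (c :: t) ∧ old ≠ [] then
      new ++ rep_cytb old new ((c :: t).drop old.length)
    else c :: rep_cytb old new t
termination_by l => l.length
decreasing_by
  · have h1 : old <+: (c :: t) := List.isPrefixOf_iff_prefix.mp _h.1
    have h2 := h1.length_le
    have h3 : old.length ≠ 0 := by simpa using _h.2
    simp only [List.length_drop, List.length_cons] at *; omega
  · simp

theorem rep_cytb_nil (old new : List Char) : rep_cytb old new [] = [] := by
  simp [rep_cytb]

theorem rep_cytb_cons_not_prefix (old new : List Char) (a : Char) (X : List Char)
    (h : ¬ old.isPrefixOf (a :: X) = true) :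
    rep_cytb old new (a :: X) = a :: rep_cytb old new X := by
  rw [rep_cytb, dif_neg]
  intro hc; exact h hc.1

theorem rep_cytb_cons_ne (h : Char) (p' new : List Char) (a : Char) (X : List Char)
    (hne : h ≠ a) :
    rep_cytb (h :: p') new (a :: X) = a :: rep_cytb (h :: p') new X := by
  apply rep_cytb_cons_not_prefix
  intro hc
  have := List.isPrefixOf_iff_prefix.mp hc
  obtain ⟨Y, hY⟩ := this
  simp at hY
  exact hne hY.1

theorem rep_cytb_prefix (p new X : List Char) (hp : p ≠ []) :
    rep_cytb p new (p ++ X) = new ++ rep_cytb p new X := by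
  cases p with
  | nil => exact absurd rfl hp
  | cons h p' =>
    rw [show (h :: p') ++ X = h :: (p' ++ X) by simp, rep_cytb, dif_pos]
    · congr 1
      rw [show h :: (p' ++ X) = (h :: p') ++ X by simp, List.drop_left]
    · exact ⟨List.isPrefixOf_iff_prefix.mpr ⟨X, by simp⟩, hp⟩

theorem rep_cytb_id_of_not_infix (old new : List Char) :
    ∀ l, ¬ old <:+: l → rep_cytb old new l = l := by
  intro l
  induction l with
  | nil => intro _; exact rep_cytb_nil _ _
  | cons c t ih =>
    intro hinf
    rw [rep_cytb_cons_not_prefix]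
    · rw [ih (fun h => hinf (List.infix_cons h))]
    · intro hp
      exact hinf (List.IsPrefix.isInfix (List.isPrefixOf_iff_prefix.mp hp))

theorem go_eq_rep_cytb (old new : List Char) (h : old ≠ []) :
    ∀ fuel l acc, l.length ≤ fuel →
      PySem.Chars.replace.go old new fuel l acc = acc.reverse ++ rep_cytb old new l := by
  intro fuel
  induction fuel with
  | zero =>
    intro l acc hl
    have hl0 : l = [] := by cases l <;> simp_all
    subst hl0
    simp [PySem.Chars.replace.go, rep_cytb_nil]
  | succ n ih =>
    intro l acc hl
    cases l with
    | nil => simp [PySem.Chars.replace.go, rep_cytb_nil]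
    | cons c t =>
      rw [PySem.Chars.replace.go]
      by_cases hp : old.isPrefixOf (c :: t) = true
      · rw [if_pos hp]
        have hlen : old.length ≥ 1 := by
          cases old with | nil => exact absurd rfl h | cons _ _ => simp
        have hd : (List.drop old.length (c :: t)).length ≤ n := by
          simp only [List.length_drop, List.length_cons] at *
          omega
        rw [ih _ _ hd]
        rw [rep_cytb, dif_pos ⟨hp, h⟩]
        simp
      · rw [if_neg hp]
        have ht : t.length ≤ n := by simp at hl; omega
        rw [ih _ _ ht, rep_cytb_cons_not_prefix _ _ _ _ hp]
        simp

theorem rep_cytb_eq_replace (old new : List Char) (h : old ≠ []) (l : List Char) :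
    PySem.Chars.replace l old new = rep_cytb old new l := by
  rw [PySem.Chars.replace, if_neg (by simpa using h)]
  simpa using go_eq_rep_cytb old new h l.length l [] le_rfl

-- the k-pattern single-pass scan: patterns 1..k of A's dict, tried at each position
def scanK_cytb (k : Nat) : List Char → List Char
  | [] => []
  | c :: t =>
    if 1 ≤ k ∧ ['1','s','t'].isPrefixOf (c :: t) then ['\u09E7','\u09AE'] ++ scanK_cytb k (t.drop 2)
    else if 2 ≤ k ∧ ['2','n','d'].isPrefixOf (c :: t) then ['\u09E8','\u09DF'] ++ scanK_cytb k (t.drop 2)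
    else if 3 ≤ k ∧ ['3','r','d'].isPrefixOf (c :: t) then ['\u09E9','\u09DF'] ++ scanK_cytb k (t.drop 2)
    else if 4 ≤ k ∧ ['4','t','h'].isPrefixOf (c :: t) then ['\u09EA','\u09B0','\u09CD','\u09A5'] ++ scanK_cytb k (t.drop 2)
    else c :: scanK_cytb k t
termination_by l => l.length
decreasing_by all_goals simp only [List.length_drop, List.length_cons]; omega

-- decompose a 3-character prefix
theorem prefix3_cytb {x y z c : Char} {t : List Char} (h : [x,y,z].isPrefixOf (c :: t) = true) :
    c = x ∧ ∃ t3, t = y :: z :: t3 := by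
  obtain ⟨X, hX⟩ := List.isPrefixOf_iff_prefix.mp h
  simp at hX
  exact ⟨hX.1.symm, X, hX.2.symm⟩

-- inversion: a scan result starting with a non-Bengali-digit character copies that character
theorem scanK_cons_inv (k : Nat) (t : List Char) (a : Char) (r : List Char)
    (ha : a ∉ ['\u09E7','\u09E8','\u09E9','\u09EA'])
    (h : scanK_cytb k t = a :: r) : ∃ t', t = a :: t' ∧ r = scanK_cytb k t' := by
  cases t with
  | nil => simp [scanK_cytb] at h
  | cons c t' =>
    rw [scanK_cytb] at h
    simp only [List.mem_cons, List.not_mem_nil, or_false, not_or] at ha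
    split_ifs at h with h1 h2 h3 h4
    · simp only [List.cons_append, List.cons.injEq] at h
      exact absurd h.1.symm ha.1
    · simp only [List.cons_append, List.cons.injEq] at h
      exact absurd h.1.symm ha.2.1
    · simp only [List.cons_append, List.cons.injEq] at h
      exact absurd h.1.symm ha.2.2.1
    · simp only [List.cons_append, List.cons.injEq] at h
      exact absurd h.1.symm ha.2.2.2
    · simp only [List.cons.injEq] at h
      exact ⟨t', by rw [h.1], h.2.symm⟩


-- scanK steps one character when none of the patterns 1..k matches at the head
theorem scanK_cons_else (k : Nat) (c : Char) (t : List Char)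
    (H1 : ¬(1 ≤ k ∧ ['1','s','t'].isPrefixOf (c :: t) = true))
    (H2 : ¬(2 ≤ k ∧ ['2','n','d'].isPrefixOf (c :: t) = true))
    (H3 : ¬(3 ≤ k ∧ ['3','r','d'].isPrefixOf (c :: t) = true))
    (H4 : ¬(4 ≤ k ∧ ['4','t','h'].isPrefixOf (c :: t) = true)) :
    scanK_cytb k (c :: t) = c :: scanK_cytb k t := by
  rw [scanK_cytb, if_neg H1, if_neg H2, if_neg H3, if_neg H4]

theorem stage1_len : ∀ n l, l.length ≤ n →
    rep_cytb ['1','s','t'] ['\u09E7','\u09AE'] l = scanK_cytb 1 l := by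
  intro n
  induction n with
  | zero =>
    intro l hl
    have h0 : l = [] := by cases l <;> simp_all
    subst h0; simp [scanK_cytb, rep_cytb_nil]
  | succ n ih =>
    intro l hl
    cases l with
    | nil => simp [scanK_cytb, rep_cytb_nil]
    | cons c t =>
      have ht : t.length ≤ n := by simp at hl; omega
      by_cases h1 : ['1','s','t'].isPrefixOf (c :: t) = true
      · obtain ⟨hc, t3, ht3⟩ := prefix3_cytb h1
        subst hc; subst ht3
        have ht3l : t3.length ≤ n := by simp at ht; omega
        conv_rhs => rw [scanK_cytb]
        rw [if_pos ⟨le_refl 1, h1⟩]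
        simp only [List.drop_succ_cons, List.drop_zero]
        rw [show ('1' :: 's' :: 't' :: t3) = ['1','s','t'] ++ t3 by simp,
            rep_cytb_prefix _ _ _ (by simp), ih t3 ht3l]
      · rw [rep_cytb_cons_not_prefix _ _ _ _ h1, ih t ht,
            scanK_cons_else 1 c t (fun h => h1 h.2) (by omega) (by omega) (by omega)]

theorem stage2_len : ∀ n l, l.length ≤ n →
    rep_cytb ['2','n','d'] ['\u09E8','\u09DF'] (scanK_cytb 1 l) = scanK_cytb 2 l := by
  intro n
  induction n with
  | zero =>
    intro l hl
    have h0 : l = [] := by cases l <;> simp_all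
    subst h0; simp [scanK_cytb, rep_cytb_nil]
  | succ n ih =>
    intro l hl
    cases l with
    | nil => simp [scanK_cytb, rep_cytb_nil]
    | cons c t =>
      have ht : t.length ≤ n := by simp at hl; omega
      by_cases h1 : ['1','s','t'].isPrefixOf (c :: t) = true
      · -- pattern 1 fires in both scans
        obtain ⟨hc, t3, ht3⟩ := prefix3_cytb h1
        subst hc; subst ht3
        have ht3l : t3.length ≤ n := by simp at ht; omega
        rw [scanK_cytb, if_pos ⟨le_refl 1, h1⟩]
        simp only [List.drop_succ_cons, List.drop_zero, List.cons_append, List.nil_append]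
        rw [rep_cytb_cons_ne _ _ _ _ _ (by decide), rep_cytb_cons_ne _ _ _ _ _ (by decide),
            ih t3 ht3l]
        conv_rhs => rw [scanK_cytb]
        rw [if_pos ⟨by omega, h1⟩]
        simp
      · by_cases h2 : ['2','n','d'].isPrefixOf (c :: t) = true
        · -- pattern 2: copied verbatim by scan 1, replaced by rep and by scan 2
          obtain ⟨hc, t3, ht3⟩ := prefix3_cytb h2
          subst hc; subst ht3
          have ht3l : t3.length ≤ n := by simp at ht; omega
          rw [scanK_cons_else 1 _ _ (fun h => h1 h.2) (by omega) (by omega) (by omega),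
              scanK_cons_else 1 _ _ (fun h => by have := (prefix3_cytb h.2).1; exact absurd this (by decide)) (by omega) (by omega) (by omega),
              scanK_cons_else 1 _ _ (fun h => by have := (prefix3_cytb h.2).1; exact absurd this (by decide)) (by omega) (by omega) (by omega)]
          rw [show ('2' :: 'n' :: 'd' :: scanK_cytb 1 t3) = ['2','n','d'] ++ scanK_cytb 1 t3 by simp,
              rep_cytb_prefix _ _ _ (by simp), ih t3 ht3l]
          conv_rhs => rw [scanK_cytb]
          rw [if_neg (fun h => h1 h.2), if_pos ⟨le_refl 2, h2⟩]
          simp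
        · -- neither fires: one character is copied everywhere
          have hnp : ¬ (['2','n','d'].isPrefixOf (c :: scanK_cytb 1 t) = true) := by
            intro hp
            obtain ⟨hc, r3, hr⟩ := prefix3_cytb hp
            obtain ⟨t', htt, hr'⟩ := scanK_cons_inv 1 t 'n' _ (by decide) hr
            obtain ⟨t'', htt', _⟩ := scanK_cons_inv 1 t' 'd' _ (by decide) hr'.symm
            subst htt'; subst htt; subst hc
            exact h2 (List.isPrefixOf_iff_prefix.mpr ⟨t'', by simp⟩)
          rw [scanK_cons_else 1 c t (fun h => h1 h.2) (by omega) (by omega) (by omega),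
              rep_cytb_cons_not_prefix _ _ _ _ hnp, ih t ht,
              scanK_cons_else 2 c t (fun h => h1 h.2) (fun h => h2 h.2) (by omega) (by omega)]

theorem stage3_len : ∀ n l, l.length ≤ n →
    rep_cytb ['3','r','d'] ['\u09E9','\u09DF'] (scanK_cytb 2 l) = scanK_cytb 3 l := by
  intro n
  induction n with
  | zero =>
    intro l hl
    have h0 : l = [] := by cases l <;> simp_all
    subst h0; simp [scanK_cytb, rep_cytb_nil]
  | succ n ih =>
    intro l hl
    cases l with
    | nil => simp [scanK_cytb, rep_cytb_nil]
    | cons c t =>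
      have ht : t.length ≤ n := by simp at hl; omega
      by_cases h1 : ['1','s','t'].isPrefixOf (c :: t) = true
      · obtain ⟨hc, t3, ht3⟩ := prefix3_cytb h1
        subst hc; subst ht3
        have ht3l : t3.length ≤ n := by simp at ht; omega
        rw [scanK_cytb, if_pos ⟨by omega, h1⟩]
        simp only [List.drop_succ_cons, List.drop_zero, List.cons_append, List.nil_append]
        rw [rep_cytb_cons_ne _ _ _ _ _ (by decide), rep_cytb_cons_ne _ _ _ _ _ (by decide),
            ih t3 ht3l]
        conv_rhs => rw [scanK_cytb]
        rw [if_pos ⟨by omega, h1⟩]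
        simp
      · by_cases h2 : ['2','n','d'].isPrefixOf (c :: t) = true
        · obtain ⟨hc, t3, ht3⟩ := prefix3_cytb h2
          subst hc; subst ht3
          have ht3l : t3.length ≤ n := by simp at ht; omega
          rw [scanK_cytb, if_neg (fun h => h1 h.2), if_pos ⟨by omega, h2⟩]
          simp only [List.drop_succ_cons, List.drop_zero, List.cons_append, List.nil_append]
          rw [rep_cytb_cons_ne _ _ _ _ _ (by decide), rep_cytb_cons_ne _ _ _ _ _ (by decide),
              ih t3 ht3l]
          conv_rhs => rw [scanK_cytb]
          rw [if_neg (fun h => h1 h.2), if_pos ⟨by omega, h2⟩]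
          simp
        · by_cases h3 : ['3','r','d'].isPrefixOf (c :: t) = true
          · obtain ⟨hc, t3, ht3⟩ := prefix3_cytb h3
            subst hc; subst ht3
            have ht3l : t3.length ≤ n := by simp at ht; omega
            rw [scanK_cons_else 2 _ _ (fun h => h1 h.2) (fun h => h2 h.2) (by omega) (by omega),
                scanK_cons_else 2 _ _ (fun h => by have := (prefix3_cytb h.2).1; exact absurd this (by decide)) (fun h => by have := (prefix3_cytb h.2).1; exact absurd this (by decide)) (by omega) (by omega),
                scanK_cons_else 2 _ _ (fun h => by have := (prefix3_cytb h.2).1; exact absurd this (by decide)) (fun h => by have := (prefix3_cytb h.2).1; exact absurd this (by decide)) (by omega) (by omega)]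
            rw [show ('3' :: 'r' :: 'd' :: scanK_cytb 2 t3) = ['3','r','d'] ++ scanK_cytb 2 t3 by simp,
                rep_cytb_prefix _ _ _ (by simp), ih t3 ht3l]
            conv_rhs => rw [scanK_cytb]
            rw [if_neg (fun h => h1 h.2), if_neg (fun h => h2 h.2), if_pos ⟨le_refl 3, h3⟩]
            simp
          · have hnp : ¬ (['3','r','d'].isPrefixOf (c :: scanK_cytb 2 t) = true) := by
              intro hp
              obtain ⟨hc, r3, hr⟩ := prefix3_cytb hp
              obtain ⟨t', htt, hr'⟩ := scanK_cons_inv 2 t 'r' _ (by decide) hr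
              obtain ⟨t'', htt', _⟩ := scanK_cons_inv 2 t' 'd' _ (by decide) hr'.symm
              subst htt'; subst htt; subst hc
              exact h3 (List.isPrefixOf_iff_prefix.mpr ⟨t'', by simp⟩)
            rw [scanK_cons_else 2 c t (fun h => h1 h.2) (fun h => h2 h.2) (by omega) (by omega),
                rep_cytb_cons_not_prefix _ _ _ _ hnp, ih t ht,
                scanK_cons_else 3 c t (fun h => h1 h.2) (fun h => h2 h.2) (fun h => h3 h.2) (by omega)]

theorem stage4_len : ∀ n l, l.length ≤ n →
    rep_cytb ['4','t','h'] ['\u09EA','\u09B0','\u09CD','\u09A5'] (scanK_cytb 3 l) = scanK_cytb 4 l := by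
  intro n
  induction n with
  | zero =>
    intro l hl
    have h0 : l = [] := by cases l <;> simp_all
    subst h0; simp [scanK_cytb, rep_cytb_nil]
  | succ n ih =>
    intro l hl
    cases l with
    | nil => simp [scanK_cytb, rep_cytb_nil]
    | cons c t =>
      have ht : t.length ≤ n := by simp at hl; omega
      by_cases h1 : ['1','s','t'].isPrefixOf (c :: t) = true
      · obtain ⟨hc, t3, ht3⟩ := prefix3_cytb h1
        subst hc; subst ht3
        have ht3l : t3.length ≤ n := by simp at ht; omega
        rw [scanK_cytb, if_pos ⟨by omega, h1⟩]
        simp only [List.drop_succ_cons, List.drop_zero, List.cons_append, List.nil_append]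
        rw [rep_cytb_cons_ne _ _ _ _ _ (by decide), rep_cytb_cons_ne _ _ _ _ _ (by decide),
            ih t3 ht3l]
        conv_rhs => rw [scanK_cytb]
        rw [if_pos ⟨by omega, h1⟩]
        simp
      · by_cases h2 : ['2','n','d'].isPrefixOf (c :: t) = true
        · obtain ⟨hc, t3, ht3⟩ := prefix3_cytb h2
          subst hc; subst ht3
          have ht3l : t3.length ≤ n := by simp at ht; omega
          rw [scanK_cytb, if_neg (fun h => h1 h.2), if_pos ⟨by omega, h2⟩]
          simp only [List.drop_succ_cons, List.drop_zero, List.cons_append, List.nil_append]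
          rw [rep_cytb_cons_ne _ _ _ _ _ (by decide), rep_cytb_cons_ne _ _ _ _ _ (by decide),
              ih t3 ht3l]
          conv_rhs => rw [scanK_cytb]
          rw [if_neg (fun h => h1 h.2), if_pos ⟨by omega, h2⟩]
          simp
        · by_cases h3 : ['3','r','d'].isPrefixOf (c :: t) = true
          · obtain ⟨hc, t3, ht3⟩ := prefix3_cytb h3
            subst hc; subst ht3
            have ht3l : t3.length ≤ n := by simp at ht; omega
            rw [scanK_cytb, if_neg (fun h => h1 h.2), if_neg (fun h => h2 h.2), if_pos ⟨by omega, h3⟩]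
            simp only [List.drop_succ_cons, List.drop_zero, List.cons_append, List.nil_append]
            rw [rep_cytb_cons_ne _ _ _ _ _ (by decide), rep_cytb_cons_ne _ _ _ _ _ (by decide),
                ih t3 ht3l]
            conv_rhs => rw [scanK_cytb]
            rw [if_neg (fun h => h1 h.2), if_neg (fun h => h2 h.2), if_pos ⟨by omega, h3⟩]
            simp
          · by_cases h4 : ['4','t','h'].isPrefixOf (c :: t) = true
            · obtain ⟨hc, t3, ht3⟩ := prefix3_cytb h4
              subst hc; subst ht3
              have ht3l : t3.length ≤ n := by simp at ht; omega
              rw [scanK_cons_else 3 _ _ (fun h => h1 h.2) (fun h => h2 h.2) (fun h => h3 h.2) (by omega),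
                  scanK_cons_else 3 _ _ (fun h => by have := (prefix3_cytb h.2).1; exact absurd this (by decide)) (fun h => by have := (prefix3_cytb h.2).1; exact absurd this (by decide)) (fun h => by have := (prefix3_cytb h.2).1; exact absurd this (by decide)) (by omega),
                  scanK_cons_else 3 _ _ (fun h => by have := (prefix3_cytb h.2).1; exact absurd this (by decide)) (fun h => by have := (prefix3_cytb h.2).1; exact absurd this (by decide)) (fun h => by have := (prefix3_cytb h.2).1; exact absurd this (by decide)) (by omega)]
              rw [show ('4' :: 't' :: 'h' :: scanK_cytb 3 t3) = ['4','t','h'] ++ scanK_cytb 3 t3 by simp,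
                  rep_cytb_prefix _ _ _ (by simp), ih t3 ht3l]
              conv_rhs => rw [scanK_cytb]
              rw [if_neg (fun h => h1 h.2), if_neg (fun h => h2 h.2), if_neg (fun h => h3 h.2),
                  if_pos ⟨le_refl 4, h4⟩]
              simp
            · have hnp : ¬ (['4','t','h'].isPrefixOf (c :: scanK_cytb 3 t) = true) := by
                intro hp
                obtain ⟨hc, r3, hr⟩ := prefix3_cytb hp
                obtain ⟨t', htt, hr'⟩ := scanK_cons_inv 3 t 't' _ (by decide) hr
                obtain ⟨t'', htt', _⟩ := scanK_cons_inv 3 t' 'h' _ (by decide) hr'.symm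
                subst htt'; subst htt; subst hc
                exact h4 (List.isPrefixOf_iff_prefix.mpr ⟨t'', by simp⟩)
              rw [scanK_cons_else 3 c t (fun h => h1 h.2) (fun h => h2 h.2) (fun h => h3 h.2) (by omega),
                  rep_cytb_cons_not_prefix _ _ _ _ hnp, ih t ht,
                  scanK_cons_else 4 c t (fun h => h1 h.2) (fun h => h2 h.2) (fun h => h3 h.2) (fun h => h4 h.2)]

-- B's dict lookup misses every chunk shorter than 3 characters
theorem get?_bmap_not3 (l : List Char) (h : l.length ≠ 3) :
    PySem.Dict.get? bmap_cytb l = none := by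
  have hitems : bmap_cytb.items =
      [(['1','s','t'], ['\u09E7','\u09AE']), (['2','n','d'], ['\u09E8','\u09DF']),
       (['3','r','d'], ['\u09E9','\u09DF']), (['4','t','h'], ['\u09EA','\u09B0','\u09CD','\u09A5'])] := by
    decide
  rw [PySem.Dict.get?, hitems]
  rw [List.find?_eq_none.mpr]
  · rfl
  · intro p hp hbeq
    have hpe := (beq_iff_eq).mp hbeq
    fin_cases hp <;> (rw [← hpe] at h; simp at h)

-- a 3-character prefix test is an equality test on the chunk
theorem chunk3_cytb {x y z c d e : Char} {t : List Char} :
    ([x,y,z].isPrefixOf (c :: d :: e :: t) = true) ↔ ([c,d,e] = [x,y,z]) := by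
  rw [List.isPrefixOf_iff_prefix]
  constructor
  · rintro ⟨X, hX⟩
    simp only [List.cons_append, List.nil_append, List.cons.injEq] at hX
    simp [hX.1, hX.2.1, hX.2.2.1]
  · intro h
    simp only [List.cons.injEq, and_true] at h
    exact ⟨t, by simp [h.1, h.2.1, h.2.2]⟩

theorem goB_eq_scan4_len : ∀ n l, l.length ≤ n → goB_cytb l = scanK_cytb 4 l := by
  intro n
  induction n with
  | zero =>
    intro l hl
    have h0 : l = [] := by cases l <;> simp_all
    subst h0; simp [goB_cytb, scanK_cytb]
  | succ n ih =>
    intro l hl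
    match l with
    | [] => simp [goB_cytb, scanK_cytb]
    | [c] =>
      rw [goB_cytb]
      rw [get?_bmap_not3 _ (by simp)]
      rw [scanK_cytb]
      simp [goB_cytb, scanK_cytb, List.isPrefixOf]
    | [c, d] =>
      rw [goB_cytb]
      rw [get?_bmap_not3 _ (by simp)]
      rw [goB_cytb]
      rw [get?_bmap_not3 _ (by simp)]
      rw [scanK_cytb]
      simp only [List.isPrefixOf, Bool.and_eq_true]
      rw [scanK_cytb]
      simp [goB_cytb, scanK_cytb, List.isPrefixOf]
    | c :: d :: e :: t3 =>
      have ht3 : t3.length ≤ n := by simp at hl; omega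
      have htail : (d :: e :: t3).length ≤ n := by simp at hl ⊢; omega
      rw [goB_cytb]
      by_cases hk1 : [c, d, e] = ['1','s','t']
      · rw [show (c :: d :: e :: t3).take 3 = [c,d,e] by simp, hk1,
            show PySem.Dict.get? bmap_cytb ['1','s','t'] = some ['\u09E7','\u09AE'] from by decide]
        rw [scanK_cytb, if_pos ⟨by omega, chunk3_cytb.mpr hk1⟩]
        simp only [List.drop_succ_cons, List.drop_zero]
        rw [ih t3 ht3]
      · by_cases hk2 : [c, d, e] = ['2','n','d']
        · rw [show (c :: d :: e :: t3).take 3 = [c,d,e] by simp, hk2,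
              show PySem.Dict.get? bmap_cytb ['2','n','d'] = some ['\u09E8','\u09DF'] from by decide]
          rw [scanK_cytb, if_neg (fun h => hk1 (chunk3_cytb.mp h.2)), if_pos ⟨by omega, chunk3_cytb.mpr hk2⟩]
          simp only [List.drop_succ_cons, List.drop_zero]
          rw [ih t3 ht3]
        · by_cases hk3 : [c, d, e] = ['3','r','d']
          · rw [show (c :: d :: e :: t3).take 3 = [c,d,e] by simp, hk3,
                show PySem.Dict.get? bmap_cytb ['3','r','d'] = some ['\u09E9','\u09DF'] from by decide]
            rw [scanK_cytb, if_neg (fun h => hk1 (chunk3_cytb.mp h.2)),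
                if_neg (fun h => hk2 (chunk3_cytb.mp h.2)), if_pos ⟨by omega, chunk3_cytb.mpr hk3⟩]
            simp only [List.drop_succ_cons, List.drop_zero]
            rw [ih t3 ht3]
          · by_cases hk4 : [c, d, e] = ['4','t','h']
            · rw [show (c :: d :: e :: t3).take 3 = [c,d,e] by simp, hk4,
                  show PySem.Dict.get? bmap_cytb ['4','t','h'] = some ['\u09EA','\u09B0','\u09CD','\u09A5'] from by decide]
              rw [scanK_cytb, if_neg (fun h => hk1 (chunk3_cytb.mp h.2)),
                  if_neg (fun h => hk2 (chunk3_cytb.mp h.2)), if_neg (fun h => hk3 (chunk3_cytb.mp h.2)),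
                  if_pos ⟨by omega, chunk3_cytb.mpr hk4⟩]
              simp only [List.drop_succ_cons, List.drop_zero]
              rw [ih t3 ht3]
            · have hnone : PySem.Dict.get? bmap_cytb [c,d,e] = none := by
                have hitems : bmap_cytb.items =
                    [(['1','s','t'], ['\u09E7','\u09AE']), (['2','n','d'], ['\u09E8','\u09DF']),
                     (['3','r','d'], ['\u09E9','\u09DF']), (['4','t','h'], ['\u09EA','\u09B0','\u09CD','\u09A5'])] := by
                  decide
                rw [PySem.Dict.get?, hitems, List.find?_eq_none.mpr]
                · rfl
                · intro p hp hbeq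
                  have hpe := (beq_iff_eq).mp hbeq
                  fin_cases hp
                  · exact hk1 hpe.symm
                  · exact hk2 hpe.symm
                  · exact hk3 hpe.symm
                  · exact hk4 hpe.symm
              rw [show (c :: d :: e :: t3).take 3 = [c,d,e] by simp, hnone]
              rw [scanK_cytb, if_neg (fun h => hk1 (chunk3_cytb.mp h.2)),
                  if_neg (fun h => hk2 (chunk3_cytb.mp h.2)), if_neg (fun h => hk3 (chunk3_cytb.mp h.2)),
                  if_neg (fun h => hk4 (chunk3_cytb.mp h.2))]
              rw [ih _ htail]

-- one pass of A's loop body, at the character level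
theorem stepA_cytb (k v : String) (hk : k.toList ≠ []) (t : String) :
    (if PySem.Str.isIn k t then PySem.Str.replace t k v else t).toList
      = rep_cytb k.toList v.toList t.toList := by
  by_cases h : PySem.Str.isIn k t = true
  · rw [if_pos h, PySem.Str.toList_replace, rep_cytb_eq_replace _ _ hk]
  · rw [if_neg h, rep_cytb_id_of_not_infix _ _ _ (fun hi => h ((PySem.Str.isIn_iff_infix _ _).mpr hi))]

-- ===== VERDICT (by name: the statement is the Claim_ definition above) =====
theorem convert_year_term_suffixes_to_bengali_spec : Claim_equal_convert_year_term_suffixes_to_bengali := by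
  intro text _
  unfold Spec_convert_year_term_suffixes_to_bengali
  unfold convert_year_term_suffixes_to_bengali convert_year_term_suffixes_to_bengali_alt
  rw [show PySem.Dict.keys amap_cytb = ["1st", "2nd", "3rd", "4th"] from by decide]
  simp only [List.foldl]
  rw [show PySem.Dict.getD amap_cytb "1st" "" = "\u09E7\u09AE" from by decide,
      show PySem.Dict.getD amap_cytb "2nd" "" = "\u09E8\u09DF" from by decide,
      show PySem.Dict.getD amap_cytb "3rd" "" = "\u09E9\u09DF" from by decide,
      show PySem.Dict.getD amap_cytb "4th" "" = "\u09EA\u09B0\u09CD\u09A5" from by decide]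
  have key : ∀ s : String, s.toList = goB_cytb text.toList → s = String.ofList (goB_cytb text.toList) := by
    intro s hs
    rw [← hs, String.ofList_toList]
  apply key
  rw [stepA_cytb _ _ (by decide), stepA_cytb _ _ (by decide),
      stepA_cytb _ _ (by decide), stepA_cytb _ _ (by decide)]
  rw [show ("1st" : String).toList = ['1','s','t'] from by decide,
      show ("2nd" : String).toList = ['2','n','d'] from by decide,
      show ("3rd" : String).toList = ['3','r','d'] from by decide,
      show ("4th" : String).toList = ['4','t','h'] from by decide,
      show ("\u09E7\u09AE" : String).toList = ['\u09E7','\u09AE'] from by decide,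
      show ("\u09E8\u09DF" : String).toList = ['\u09E8','\u09DF'] from by decide,
      show ("\u09E9\u09DF" : String).toList = ['\u09E9','\u09DF'] from by decide,
      show ("\u09EA\u09B0\u09CD\u09A5" : String).toList = ['\u09EA','\u09B0','\u09CD','\u09A5'] from by decide]
  rw [stage1_len text.toList.length _ le_rfl]
  rw [stage2_len text.toList.length text.toList le_rfl]
  rw [stage3_len text.toList.length text.toList le_rfl]
  rw [stage4_len text.toList.length text.toList le_rfl]
  rw [goB_eq_scan4_len text.toList.length _ le_rfl]
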